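-- pv_equiv track=rewrite | github.com/SangHui48/study_algorithm | programmers/lv1/부족한 금액 계산하기.py | solution
-- ===== SOURCE A (Python) =====
-- def solution(price, money, count):
--     answer = 0
--     accumulation = 0
--     for i in range(1, count+1):
--         accumulation += (price * i)
--     remain = money - accumulation
--     if remain < 0:
--         return remain * -1
--     return answer
-- ===== SOURCE B (Python) =====
-- def solution(price, money, count):
--     n = count if count > 0 else 0
--     total = price * n * (n + 1) // 2
--     shortfall = total - money
--     return shortfall if shortfall > 0 else 0
-- ===== Notes on version B (the rewrite author's own statement) =====
-- stated objective: faster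
-- what changed: replaces the O(count) accumulation loop with the closed-form arithmetic-series sum price*n*(n+1)//2 and returns max(total-money, 0)
import Mathlib
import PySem

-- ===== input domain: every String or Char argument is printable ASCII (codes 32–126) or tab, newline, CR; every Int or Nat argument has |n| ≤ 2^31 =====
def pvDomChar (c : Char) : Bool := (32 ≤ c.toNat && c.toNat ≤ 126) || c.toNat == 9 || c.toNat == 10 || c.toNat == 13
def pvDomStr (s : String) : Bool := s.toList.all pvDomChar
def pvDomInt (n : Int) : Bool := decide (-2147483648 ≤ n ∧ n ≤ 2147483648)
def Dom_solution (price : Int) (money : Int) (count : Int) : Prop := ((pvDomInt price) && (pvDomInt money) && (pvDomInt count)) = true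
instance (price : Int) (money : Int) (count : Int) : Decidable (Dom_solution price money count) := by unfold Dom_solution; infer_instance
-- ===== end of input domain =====

-- B replaces A's O(count) accumulation loop with the closed-form arithmetic-series sum (faster).


-- ===== PORT A =====
def solution (price : Int) (money : Int) (count : Int) : Int :=
  let answer : Int := 0
  let accumulation : Int :=
    (PySem.List.pyRange 1 (count + 1) 1).foldl (fun acc i => acc + price * i) 0
  let remain := money - accumulation
  if remain < 0 then remain * (-1) else answer

-- ===== PORT B =====
def solution_alt (price : Int) (money : Int) (count : Int) : Int :=
  let n : Int := if count > 0 then count else 0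
  let total : Int := PySem.Int.floordiv (price * n * (n + 1)) 2
  let shortfall := total - money
  if shortfall > 0 then shortfall else 0

-- ===== PRECONDITION & SPEC =====
def Spec_solution (price : Int) (money : Int) (count : Int) (out : Int) : Prop := out = solution_alt price money count
instance (price : Int) (money : Int) (count : Int) (out : Int) : Decidable (Spec_solution price money count out) := by unfold Spec_solution; infer_instance

-- ===== CLAIM (what is proved, stated in full; the proofs are below) =====
def Claim_equal_solution : Prop := ∀ (price : Int) (money : Int) (count : Int), Dom_solution price money count → Spec_solution price money count (solution price money count)

-- ===== LEMMAS AND PROOFS =====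

-- The loop's accumulation equals the closed-form series sum, for nonnegative upper bound.
theorem pv_sum_range (price : Int) (n : Nat) :
    (PySem.List.pyRange 1 ((n : Int) + 1) 1).foldl (fun acc i => acc + price * i) 0
      = price * (n : Int) * ((n : Int) + 1) / 2 := by
  induction n with
  | zero =>
    simp
  | succ m ih =>
    have h : PySem.List.pyRange 1 (((m + 1 : Nat) : Int) + 1) 1
        = PySem.List.pyRange 1 ((m : Int) + 1) 1 ++ [(m : Int) + 1] := by
      have := PySem.List.pyRange_one_succ_right (a := 1) (b := (m : Int) + 1) (by omega)
      simpa [add_assoc] using this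
    rw [h, List.foldl_append, ih]
    push_cast
    have heven : ∃ k : Int, (m : Int) * ((m : Int) + 1) = 2 * k := by
      rcases Int.even_or_odd (m : Int) with ⟨k, hk⟩ | ⟨k, hk⟩
      · exact ⟨k * ((m : Int) + 1), by rw [hk]; ring⟩
      · exact ⟨(m : Int) * (k + 1), by rw [hk]; ring⟩
    rcases heven with ⟨k, hk⟩
    have h1 : price * (m : Int) * ((m : Int) + 1) / 2 = price * k := by
      rw [show price * (m : Int) * ((m : Int) + 1) = 2 * (price * k) by rw [mul_assoc, hk]; ring]
      exact Int.mul_ediv_cancel_left _ (by norm_num)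
    have h2 : price * ((m : Int) + 1) * ((m : Int) + 1 + 1) / 2 = price * k + price * ((m : Int) + 1) := by
      rw [show price * ((m : Int) + 1) * ((m : Int) + 1 + 1)
            = 2 * (price * k + price * ((m : Int) + 1)) by
        have : ((m : Int) + 1) * ((m : Int) + 1 + 1) = (m : Int) * ((m : Int) + 1) + 2 * ((m : Int) + 1) := by ring
        calc price * ((m : Int) + 1) * ((m : Int) + 1 + 1)
            = price * (((m : Int) + 1) * ((m : Int) + 1 + 1)) := by ring
          _ = price * ((m : Int) * ((m : Int) + 1) + 2 * ((m : Int) + 1)) := by rw [this]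
          _ = 2 * (price * k + price * ((m : Int) + 1)) := by rw [hk]; ring]
      exact Int.mul_ediv_cancel_left _ (by norm_num)
    rw [h1, h2]
    simp [List.foldl]

-- ===== VERDICT (by name: the statement is the Claim_ definition above) =====
theorem solution_spec : Claim_equal_solution := by
  intro price money count _
  unfold Spec_solution solution solution_alt
  by_cases hc : count > 0
  · have hn : count = ((count.toNat : Nat) : Int) := by omega
    simp only [hc, if_pos]
    rw [hn, pv_sum_range price count.toNat,
        PySem.Int.floordiv_eq_ediv_of_pos (by norm_num : (0:Int) < 2)]
    split_ifs <;> omega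
  · have h0 : (PySem.List.pyRange 1 (count + 1) 1) = [] :=
      PySem.List.pyRange_one_eq_nil (by omega)
    simp only [if_neg hc, h0]
    rw [PySem.Int.floordiv_eq_ediv_of_pos (by norm_num : (0:Int) < 2)]
    simp only [List.foldl_nil, mul_zero, zero_mul, Int.zero_ediv]
    split_ifs <;> omega
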